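-- pv_equiv track=rewrite | github.com/saketkumarjha/caresetuAgent_3.0 | knowledge/engines/domain_expertise.py | _prioritize_document_sources
-- ===== SOURCE A (Python) =====
-- from typing import Dict, List, Optional, Tuple, Any
--
-- def _prioritize_document_sources(document_sources: List[str],
--                                priorities: List[str]) -> List[str]:
--     """Prioritize document sources based on domain preferences."""
--     prioritized = []
--
--     # First, add sources that match priority order
--     for priority_type in priorities:
--         for source in document_sources:
--             if priority_type.lower() in source.lower() and source not in prioritized:
--                 prioritized.append(source)
--
--     # Then add remaining sources
--     for source in document_sources:
--         if source not in prioritized: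
--             prioritized.append(source)
--
--     return prioritized
-- ===== SOURCE B (Python) =====
-- def _prioritize_document_sources(document_sources, priorities):
--     """Dedup once, rank each unique source by its first matching priority, then group by rank."""
--     unique_sources = list(dict.fromkeys(document_sources))
--     lowered = [p.lower() for p in priorities]
--     buckets = [[] for _ in range(len(lowered) + 1)]
--     for source in unique_sources:
--         s = source.lower()
--         r = len(lowered)
--         for i, p in enumerate(lowered):
--             if p in s:
--                 r = i
--                 break
--         buckets[r].append(source)
--     return [source for bucket in buckets for source in bucket]
-- ===== Notes on version B (the rewrite author's own statement) =====
-- stated objective: faster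
-- what changed: Instead of rescanning all sources per priority with a 'not in prioritized' list-membership test, B deduplicates once via dict.fromkeys, computes each unique source's first-matching-priority rank in one pass, appends it to a rank bucket, and concatenates the buckets.
import Mathlib
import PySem

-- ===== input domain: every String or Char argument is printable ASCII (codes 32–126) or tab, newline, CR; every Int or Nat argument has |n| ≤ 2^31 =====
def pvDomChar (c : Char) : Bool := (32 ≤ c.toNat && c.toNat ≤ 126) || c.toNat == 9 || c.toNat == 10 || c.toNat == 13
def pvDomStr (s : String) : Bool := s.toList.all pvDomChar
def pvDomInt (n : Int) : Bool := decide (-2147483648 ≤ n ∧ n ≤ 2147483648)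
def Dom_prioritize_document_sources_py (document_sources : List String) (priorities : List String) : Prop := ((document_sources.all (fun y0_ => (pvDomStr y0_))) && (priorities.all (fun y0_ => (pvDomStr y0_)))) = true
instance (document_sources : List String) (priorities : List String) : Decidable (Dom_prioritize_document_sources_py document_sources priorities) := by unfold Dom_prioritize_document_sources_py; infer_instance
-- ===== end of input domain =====

-- B replaces A's per-priority rescans with a 'not in prioritized' membership test by: dedup once,
-- rank each unique source by its first matching priority in one pass, group into rank buckets (faster).

-- ===== PORT A =====
def prioritize_document_sources_py (document_sources : List String) (priorities : List String) : List String :=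
  let prioritized :=
    priorities.foldl (fun acc priority_type =>
      document_sources.foldl (fun acc source =>
        if PySem.Str.isIn (PySem.Str.lower priority_type) (PySem.Str.lower source)
            && !(acc.contains source) then acc ++ [source] else acc) acc) []
  document_sources.foldl (fun acc source =>
    if !(acc.contains source) then acc ++ [source] else acc) prioritized

-- ===== PORT B =====
-- Source B's inner loop 'r = len(lowered); for i, p in enumerate(lowered): if p in s: r = i; break'
def pvRankGo (s : String) (ps : List String) (i : Nat) (r : Nat) : Nat :=
  match ps with
  | [] => r
  | p :: rest => if PySem.Str.isIn p s then i else pvRankGo s rest (i + 1) r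

-- 'buckets[r].append(source)' is ported as set/getD; r < buckets.length always holds (proved below),
-- so getD's default is never reached — exact.
def prioritize_document_sources_py_alt (document_sources : List String) (priorities : List String) : List String :=
  let unique_sources := PySem.List.dedup document_sources
  let lowered := priorities.map PySem.Str.lower
  let buckets0 : List (List String) := (List.range (lowered.length + 1)).map (fun _ => ([] : List String))
  let buckets := unique_sources.foldl (fun bs source =>
    let r := pvRankGo (PySem.Str.lower source) lowered 0 lowered.length
    bs.set r (bs.getD r [] ++ [source])) buckets0
  buckets.flatten

-- ===== PRECONDITION & SPEC =====
def Spec_prioritize_document_sources_py (document_sources : List String) (priorities : List String) (out : List String) : Prop := out = prioritize_document_sources_py_alt document_sources priorities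
instance (document_sources : List String) (priorities : List String) (out : List String) : Decidable (Spec_prioritize_document_sources_py document_sources priorities out) := by unfold Spec_prioritize_document_sources_py; infer_instance

-- ===== CLAIM (what is proved, stated in full; the proofs are below) =====
def Claim_equal_prioritize_document_sources_py : Prop := ∀ (document_sources : List String) (priorities : List String), Dom_prioritize_document_sources_py document_sources priorities → Spec_prioritize_document_sources_py document_sources priorities (prioritize_document_sources_py document_sources priorities)

-- ===== LEMMAS AND PROOFS =====

def pvR (L : List String) (s : String) : Nat := pvRankGo (PySem.Str.lower s) L 0 L.length

def pvBk (ds L : List String) (k : Nat) : List String :=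
  (List.range k).flatMap (fun i => (PySem.List.dedup ds).filter (fun s => pvR L s == i))

theorem pvRankGo_eq_findIdx? (s : String) (ps : List String) (i r : Nat) :
    pvRankGo s ps i r = ((ps.findIdx? (fun p => PySem.Str.isIn p s)).map (i + ·)).getD r := by
  induction ps generalizing i with
  | nil => simp [pvRankGo]
  | cons p rest ih =>
    by_cases h : PySem.Chars.isIn p.toList s.toList
    · simp [pvRankGo, List.findIdx?_cons, h]
    · simp [pvRankGo, List.findIdx?_cons, h, ih (i+1)]
      cases rest.findIdx? (fun p => PySem.Chars.isIn p.toList s.toList) <;> simp <;> omega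

theorem pvR_le (L : List String) (s : String) : pvR L s ≤ L.length := by
  rw [pvR, pvRankGo_eq_findIdx?]
  cases h : L.findIdx? (fun p => PySem.Str.isIn p (PySem.Str.lower s)) with
  | none => simp
  | some j =>
    have : j < L.length := (List.findIdx?_eq_some_iff_findIdx_eq.mp h).1
    simp; omega

theorem pv_rank_step (Lpre : List String) (q : String) (Lsuf : List String) (s : String) :
    (PySem.Str.isIn q (PySem.Str.lower s) && !decide (pvR (Lpre ++ q :: Lsuf) s < Lpre.length))
      = (pvR (Lpre ++ q :: Lsuf) s == Lpre.length) := by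
  rw [pvR, pvRankGo_eq_findIdx?]
  rw [List.findIdx?_append, List.findIdx?_cons]
  cases hpre : Lpre.findIdx? (fun p => PySem.Str.isIn p (PySem.Str.lower s)) with
  | some j =>
    have hj : j < Lpre.length := (List.findIdx?_eq_some_iff_findIdx_eq.mp hpre).1
    by_cases hq : PySem.Chars.isIn q.toList (PySem.Chars.lower s.toList) <;>
      simp [hq, Option.or, hj] <;> omega
  | none =>
    by_cases hq : PySem.Chars.isIn q.toList (PySem.Chars.lower s.toList)
    · simp [hq, Option.or]
    · cases hsuf : Lsuf.findIdx? (fun p => PySem.Str.isIn p (PySem.Str.lower s)) with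
      | none => simp [hq, Option.or, List.length_append]; try omega
      | some j => simp [hq, Option.or, List.length_append]; try omega

theorem pv_foldl_add (xs : List String) : ∀ acc : List String,
    xs.foldl PySem.Set.add acc = acc ++ (PySem.List.dedup xs).filter (fun y => !acc.contains y) := by
  induction xs with
  | nil => intro acc; simp [PySem.List.dedup, PySem.Set.ofList]
  | cons x xs ih =>
    intro acc
    have hded : PySem.List.dedup (x :: xs) = PySem.Set.add [] x ++ (PySem.List.dedup xs).filter (fun y => !(PySem.Set.add [] x).contains y) := by
      show (x :: xs).foldl PySem.Set.add [] = _
      rw [List.foldl_cons]; exact ih _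
    simp only [PySem.Set.add, PySem.Set.contains, List.contains_nil, Bool.false_eq_true, if_false,
      List.nil_append] at hded
    rw [List.foldl_cons, ih, hded]
    by_cases hc : x ∈ acc
    · have hax : PySem.Set.add acc x = acc := by simp [PySem.Set.add, PySem.Set.contains, List.contains_iff_mem, hc]
      rw [hax]
      simp only [List.singleton_append, List.filter_cons, List.filter_filter]
      have hx : (!acc.contains x) = false := by simp [List.contains_iff_mem, hc]
      simp only [hx, Bool.false_eq_true, if_false]
      congr 1
      apply List.filter_congr
      intro y _
      by_cases hyx : y = x
      · subst hyx; simp [List.contains_iff_mem, hc]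
      · simp [hyx]
    · have hax : PySem.Set.add acc x = acc ++ [x] := by simp [PySem.Set.add, PySem.Set.contains, List.contains_iff_mem, hc]
      rw [hax, List.append_assoc]
      congr 1
      simp only [List.singleton_append, List.filter_cons, List.filter_filter]
      have hx : (!acc.contains x) = true := by simp [List.contains_iff_mem, hc]
      simp only [hx, if_true]
      congr 1
      apply List.filter_congr
      intro y _
      simp [List.contains_append, Bool.and_comm]

theorem pv_dedup_cons (x : String) (xs : List String) :
    PySem.List.dedup (x :: xs) = x :: (PySem.List.dedup xs).filter (fun y => !(y == x)) := by
  have h : PySem.List.dedup (x :: xs) = (x :: xs).foldl PySem.Set.add [] := rfl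
  rw [h, List.foldl_cons, pv_foldl_add]
  simp [PySem.Set.add, PySem.Set.contains, beq_eq_decide]

theorem pv_inner_pass (q : String → Bool) (ds : List String) : ∀ acc0 : List String,
    ds.foldl (fun acc s => if q s && !acc.contains s then acc ++ [s] else acc) acc0
      = acc0 ++ (PySem.List.dedup ds).filter (fun s => q s && !acc0.contains s) := by
  induction ds with
  | nil => intro acc0; simp [PySem.List.dedup, PySem.Set.ofList]
  | cons s ds ih =>
    intro acc0
    rw [List.foldl_cons, ih, pv_dedup_cons]
    by_cases hc : (q s && !acc0.contains s) = true
    · simp only [hc, if_true, List.filter_cons, List.filter_filter, List.append_assoc,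
        List.singleton_append]
      congr 2
      apply List.filter_congr
      intro y _
      by_cases hy : y = s
      · subst hy
        simp only [List.contains_append, List.contains_cons, List.contains_nil]
        simp [Bool.and_comm]
      · simp [hy, beq_eq_decide, List.contains_append, Bool.and_comm, Bool.and_left_comm]
    · simp only [hc, Bool.false_eq_true, if_false, List.filter_cons, List.filter_filter]
      congr 1
      apply List.filter_congr
      intro y _
      by_cases hy : y = s
      · subst hy
        cases hqy : q y <;> cases hmem : acc0.contains y <;>
          simp_all [List.contains_iff_mem]
      · simp [hy, beq_eq_decide]

theorem pv_mem_Bk (ds L : List String) (k : Nat) (s : String) :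
    s ∈ pvBk ds L k ↔ s ∈ PySem.List.dedup ds ∧ pvR L s < k := by
  simp only [pvBk, List.mem_flatMap, List.mem_range, List.mem_filter, beq_iff_eq]
  constructor
  · rintro ⟨i, hik, hmem, hr⟩; exact ⟨hmem, by omega⟩
  · rintro ⟨hmem, hlt⟩; exact ⟨pvR L s, hlt, hmem, rfl⟩

theorem pv_Bk_succ (ds L : List String) (k : Nat) :
    pvBk ds L (k + 1) = pvBk ds L k ++ (PySem.List.dedup ds).filter (fun s => pvR L s == k) := by
  simp [pvBk, List.range_succ]

theorem pv_outerA (ds : List String) : ∀ (suf pre : List String),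
    suf.foldl (fun acc priority_type =>
        ds.foldl (fun acc source =>
          if PySem.Str.isIn (PySem.Str.lower priority_type) (PySem.Str.lower source)
              && !(acc.contains source) then acc ++ [source] else acc) acc)
      (pvBk ds ((pre ++ suf).map PySem.Str.lower) pre.length)
    = pvBk ds ((pre ++ suf).map PySem.Str.lower) (pre ++ suf).length := by
  intro suf
  induction suf with
  | nil => intro pre; simp
  | cons p suf ih =>
    intro pre
    rw [List.foldl_cons]
    have hstep : ds.foldl (fun acc source =>
          if PySem.Str.isIn (PySem.Str.lower p) (PySem.Str.lower source)
              && !(acc.contains source) then acc ++ [source] else acc)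
        (pvBk ds ((pre ++ p :: suf).map PySem.Str.lower) pre.length)
        = pvBk ds ((pre ++ p :: suf).map PySem.Str.lower) (pre.length + 1) := by
      rw [pv_inner_pass, pv_Bk_succ]
      congr 1
      apply List.filter_congr
      intro y hy
      have hy' : y ∈ ds := by simpa using hy
      have hcont : (pvBk ds ((pre ++ p :: suf).map PySem.Str.lower) pre.length).contains y
          = decide (pvR ((pre ++ p :: suf).map PySem.Str.lower) y < pre.length) := by
        by_cases h : pvR ((pre ++ p :: suf).map PySem.Str.lower) y < pre.length
        · simp [List.contains_iff_mem, pv_mem_Bk, hy', h]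
        · simp [List.contains_iff_mem, pv_mem_Bk, hy', h]
      rw [hcont]
      have hmap : (pre ++ p :: suf).map PySem.Str.lower
          = pre.map PySem.Str.lower ++ PySem.Str.lower p :: suf.map PySem.Str.lower := by simp
      rw [hmap]
      have hstep' := pv_rank_step (pre.map PySem.Str.lower) (PySem.Str.lower p) (suf.map PySem.Str.lower) y
      simpa using hstep'
    rw [hstep]
    have h2 := ih (pre ++ [p])
    simp only [List.append_assoc, List.singleton_append, List.length_append,
      List.length_cons, List.length_singleton] at h2 ⊢
    convert h2 using 3 <;> omega

theorem pv_bfold (L : List String) (u : List String) : ∀ g : Nat → List String,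
    u.foldl (fun bs source =>
        bs.set (pvRankGo (PySem.Str.lower source) L 0 L.length)
          (bs.getD (pvRankGo (PySem.Str.lower source) L 0 L.length) [] ++ [source]))
      ((List.range (L.length + 1)).map g)
    = (List.range (L.length + 1)).map (fun i => g i ++ u.filter (fun s => pvR L s == i)) := by
  induction u with
  | nil => intro g; simp
  | cons s u ih =>
    intro g
    rw [List.foldl_cons]
    have hrlt : pvR L s < L.length + 1 := Nat.lt_succ_of_le (pvR_le L s)
    have hgetD : ((List.range (L.length+1)).map g).getD (pvRankGo (PySem.Str.lower s) L 0 L.length) [] = g (pvR L s) := by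
      rw [List.getD_eq_getElem?_getD]
      simp only [List.getElem?_map, List.getElem?_range]
      show ((List.range (L.length + 1))[pvR L s]?.map g).getD [] = g (pvR L s)
      simp [List.getElem?_range, hrlt]
    have hset : ((List.range (L.length+1)).map g).set (pvRankGo (PySem.Str.lower s) L 0 L.length) (g (pvR L s) ++ [s])
        = (List.range (L.length+1)).map (fun i => if i = pvR L s then g i ++ [s] else g i) := by
      apply List.ext_getElem
      · simp
      · intro n h1 h2
        simp only [List.length_map, List.length_range] at h1
        show (((List.range (L.length+1)).map g).set (pvR L s) (g (pvR L s) ++ [s]))[n] = _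
        rw [List.getElem_set]
        simp only [List.getElem_map, List.getElem_range]
        by_cases hn : pvR L s = n
        · simp [hn]
        · simp [hn, Ne.symm hn]
    rw [hgetD, hset, ih]
    apply List.map_congr_left
    intro i hi
    by_cases his : pvR L s = i
    · simp [List.filter_cons, his]
    · simp [List.filter_cons, his, Ne.symm his]

theorem pv_main (ds ps : List String) :
    prioritize_document_sources_py ds ps = prioritize_document_sources_py_alt ds ps := by
  have hprior : ps.foldl (fun acc priority_type =>
      ds.foldl (fun acc source =>
        if PySem.Str.isIn (PySem.Str.lower priority_type) (PySem.Str.lower source)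
            && !(acc.contains source) then acc ++ [source] else acc) acc) []
      = pvBk ds (ps.map PySem.Str.lower) ps.length := by
    have h := pv_outerA ds ps []
    simpa [pvBk] using h
  have hA : prioritize_document_sources_py ds ps
      = pvBk ds (ps.map PySem.Str.lower) (ps.length + 1) := by
    unfold prioritize_document_sources_py
    rw [hprior]
    have hq : (fun (acc : List String) (source : String) =>
          if !(acc.contains source) then acc ++ [source] else acc)
        = (fun (acc : List String) (source : String) =>
          if (fun _ : String => true) source && !(acc.contains source) then acc ++ [source] else acc) := by
      funext acc source; simp
    rw [hq, pv_inner_pass, pv_Bk_succ]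
    congr 1
    apply List.filter_congr
    intro y hy
    have hy' : y ∈ ds := by simpa using hy
    have hle : pvR (ps.map PySem.Str.lower) y ≤ ps.length := by
      have := pvR_le (ps.map PySem.Str.lower) y
      simpa using this
    by_cases h : pvR (ps.map PySem.Str.lower) y < ps.length
    · simp [List.contains_iff_mem, pv_mem_Bk, hy', h]; omega
    · simp [List.contains_iff_mem, pv_mem_Bk, hy', h]; omega
  have hB : prioritize_document_sources_py_alt ds ps
      = pvBk ds (ps.map PySem.Str.lower) (ps.length + 1) := by
    unfold prioritize_document_sources_py_alt
    show (((List.range ((ps.map PySem.Str.lower).length + 1)).map (fun _ => ([] : List String))) |> (PySem.List.dedup ds).foldl (fun bs source =>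
        bs.set (pvRankGo (PySem.Str.lower source) (ps.map PySem.Str.lower) 0 (ps.map PySem.Str.lower).length)
          (bs.getD (pvRankGo (PySem.Str.lower source) (ps.map PySem.Str.lower) 0 (ps.map PySem.Str.lower).length) [] ++ [source]))).flatten = _
    rw [pv_bfold]
    simp [pvBk, List.flatMap_def]
  rw [hA, hB]

-- ===== VERDICT (by name: the statement is the Claim_ definition above) =====
theorem prioritize_document_sources_py_spec : Claim_equal_prioritize_document_sources_py := by
  intro ds ps _
  show _ = _
  exact pv_main ds ps
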